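-- pv_equiv track=rewrite | github.com/saiadupa/scrabble | app.py | can_form_word
-- ===== SOURCE A (Python) =====
-- from collections import Counter
--
-- def can_form_word(word, pattern, letters):
--     letter_counter = Counter(letters.lower())
--
--     # Check if the word matches the pattern and can be formed with the given letters
--     for w_char, p_char in zip(word, pattern):
--         if p_char in ['_', '?']:
--             if letter_counter[w_char] > 0:
--                 letter_counter[w_char] -= 1
--             else:
--                 return False
--         elif w_char != p_char:
--             return False
--     return True
-- ===== SOURCE B (Python) =====
-- def can_form_word(word, pattern, letters):
--     pairs = list(zip(word, pattern))
--     # Stage 1: any fixed-position mismatch kills it outright.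
--     if any(p not in '_?' and w != p for w, p in pairs):
--         return False
--     # Stage 2: the characters demanded at wildcard positions, compared by raw counts.
--     wild = [w for w, p in pairs if p in '_?']
--     pool = letters.lower()
--     return all(wild.count(c) <= pool.count(c) for c in wild)
-- ===== Notes on version B (the rewrite author's own statement) =====
-- stated objective: alternative
-- what changed: A greedily consumes letters from a mutable Counter position by position with early exits; B uses no counter at all: one any() over the zipped pairs rejects fixed-position mismatches, then it collects the wildcard-position characters into a list and compares raw .count() tallies against letters.lower().
import Mathlib
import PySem

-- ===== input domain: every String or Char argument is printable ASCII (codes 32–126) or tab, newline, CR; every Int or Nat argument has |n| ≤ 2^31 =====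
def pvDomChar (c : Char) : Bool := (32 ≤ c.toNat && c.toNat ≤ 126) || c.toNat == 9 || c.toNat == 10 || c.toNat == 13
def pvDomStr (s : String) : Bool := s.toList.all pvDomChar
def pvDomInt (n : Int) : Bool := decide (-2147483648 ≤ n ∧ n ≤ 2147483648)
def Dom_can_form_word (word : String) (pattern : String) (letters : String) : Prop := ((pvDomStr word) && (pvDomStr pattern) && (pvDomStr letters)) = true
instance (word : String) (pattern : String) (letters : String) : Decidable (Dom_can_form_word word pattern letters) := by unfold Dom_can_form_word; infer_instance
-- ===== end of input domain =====

-- B replaces A's greedy consumption of a mutable availability counter by a staged, counter-free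
-- decomposition: reject fixed-position mismatches, then compare raw list counts of wildcard chars.

-- ===== PORT A =====
-- the for-loop over zip(word, pattern), carrying the mutable letter_counter; early returns become base cases
def pvALoop : List (Char × Char) → PySem.Dict Char Int → Bool
  | [], _ => true
  | (w, p) :: rest, d =>
    if p = '_' ∨ p = '?' then
      if d.getD w 0 > 0 then pvALoop rest (d.modify w 0 (· - 1)) else false
    else if w ≠ p then false
    else pvALoop rest d

def can_form_word (word : String) (pattern : String) (letters : String) : Bool :=
  pvALoop (word.toList.zip pattern.toList)
    (PySem.Dict.counter (PySem.Chars.lower letters.toList))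

-- ===== PORT B =====
def can_form_word_alt (word : String) (pattern : String) (letters : String) : Bool :=
  let pairs := word.toList.zip pattern.toList
  -- Stage 1: any fixed-position mismatch kills it outright.
  if pairs.any (fun wp => !decide (wp.2 = '_' ∨ wp.2 = '?') && decide (wp.1 ≠ wp.2)) then
    false
  else
    -- Stage 2: characters demanded at wildcard positions, compared by raw counts.
    let wild := (pairs.filter (fun wp => decide (wp.2 = '_' ∨ wp.2 = '?'))).map (·.1)
    let pool := PySem.Chars.lower letters.toList
    wild.all (fun c => decide (wild.count c ≤ pool.count c))

-- ===== PRECONDITION & SPEC =====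
def Spec_can_form_word (word : String) (pattern : String) (letters : String) (out : Bool) : Prop := out = can_form_word_alt word pattern letters
instance (word : String) (pattern : String) (letters : String) (out : Bool) : Decidable (Spec_can_form_word word pattern letters out) := by unfold Spec_can_form_word; infer_instance

-- ===== CLAIM (what is proved, stated in full; the proofs are below) =====
def Claim_equal_can_form_word : Prop := ∀ (word : String) (pattern : String) (letters : String), Dom_can_form_word word pattern letters → Spec_can_form_word word pattern letters (can_form_word word pattern letters)

-- ===== LEMMAS AND PROOFS =====

-- the word characters at wildcard positions of the zipped list
def pvWild (l : List (Char × Char)) : List Char :=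
  (l.filter (fun wp => decide (wp.2 = '_' ∨ wp.2 = '?'))).map (·.1)

-- no fixed-position mismatch
def pvNoMis (l : List (Char × Char)) : Bool :=
  !l.any (fun wp => !decide (wp.2 = '_' ∨ wp.2 = '?') && decide (wp.1 ≠ wp.2))

theorem pv_count_cons (w c : Char) (xs : List Char) :
    ((w :: xs).count c : Int) = (xs.count c : Int) + (if c = w then 1 else 0) := by
  by_cases h : c = w
  · subst h
    rw [List.count_cons, if_pos rfl, if_pos (by simp)]
    push_cast
    ring
  · rw [List.count_cons, if_neg h, if_neg (by simpa using Ne.symm h)]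
    push_cast
    ring

theorem pvALoop_char (l : List (Char × Char)) (d : PySem.Dict Char Int) :
    pvALoop l d = true ↔
      pvNoMis l = true ∧ ∀ c ∈ pvWild l, ((pvWild l).count c : Int) ≤ d.getD c 0 := by
  induction l generalizing d with
  | nil => simp [pvALoop, pvNoMis, pvWild]
  | cons wp rest ih =>
    obtain ⟨w, p⟩ := wp
    by_cases hwild : p = '_' ∨ p = '?'
    · have hW : pvWild ((w, p) :: rest) = w :: pvWild rest := by
        simp [pvWild, List.filter, hwild]
      have hN : pvNoMis ((w, p) :: rest) = pvNoMis rest := by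
        rcases hwild with h | h <;> simp [pvNoMis, h]
      by_cases hpos : d.getD w 0 > 0
      · rw [show pvALoop ((w, p) :: rest) d
              = pvALoop rest (d.modify w 0 (· - 1)) by simp [pvALoop, hwild, hpos]]
        rw [ih, hW, hN]
        constructor
        · rintro ⟨hm, hc⟩
          refine ⟨hm, ?_⟩
          intro c hc'
          rw [pv_count_cons]
          by_cases hcw : c = w
          · subst hcw
            by_cases hcm : c ∈ pvWild rest
            · have := hc c hcm
              rw [PySem.Dict.getD_modify, if_pos rfl] at this
              rw [if_pos rfl]
              omega
            · rw [List.count_eq_zero_of_not_mem hcm, if_pos rfl]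
              omega
          · have hmem : c ∈ pvWild rest := by
              rcases List.mem_cons.mp hc' with h | h
              · exact absurd h hcw
              · exact h
            have := hc c hmem
            rw [PySem.Dict.getD_modify] at this
            simp only [if_neg hcw] at this ⊢
            omega
        · rintro ⟨hm, hc⟩
          refine ⟨hm, ?_⟩
          intro c hmem
          rw [PySem.Dict.getD_modify]
          by_cases hcw : c = w
          · subst hcw
            have := hc c (List.mem_cons_self)
            rw [pv_count_cons, if_pos rfl] at this
            rw [if_pos rfl]
            omega
          · have := hc c (List.mem_cons_of_mem _ hmem)
            rw [pv_count_cons] at this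
            simp only [if_neg hcw] at this ⊢
            omega
      · rw [show pvALoop ((w, p) :: rest) d = false by simp [pvALoop, hwild, hpos]]
        rw [hW, hN]
        refine iff_of_false (by simp) ?_
        rintro ⟨_, hc⟩
        have := hc w (List.mem_cons_self)
        rw [pv_count_cons, if_pos rfl] at this
        have hnn : (0 : Int) ≤ ((pvWild rest).count w : Int) := by positivity
        omega
    · have hW : pvWild ((w, p) :: rest) = pvWild rest := by
        simp [pvWild, List.filter, hwild]
      by_cases hmis : w = p
      · subst hmis
        rw [show pvALoop ((w, w) :: rest) d = pvALoop rest d by simp [pvALoop, hwild]]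
        have hN : pvNoMis ((w, w) :: rest) = pvNoMis rest := by simp [pvNoMis]
        rw [ih, hW, hN]
      · rw [show pvALoop ((w, p) :: rest) d = false by simp [pvALoop, hwild, hmis]]
        have hN : pvNoMis ((w, p) :: rest) = false := by
          have h1 : p = '_' ∨ p = '?' ↔ False := iff_false_intro hwild
          simp [pvNoMis, List.any_cons, h1, hmis]
        rw [hW, hN]
        refine iff_of_false (by simp) ?_
        rintro ⟨hm, _⟩
        exact Bool.false_ne_true hm

-- ===== VERDICT (by name: the statement is the Claim_ definition above) =====
theorem can_form_word_spec : Claim_equal_can_form_word := by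
  intro word pattern letters _
  unfold Spec_can_form_word can_form_word can_form_word_alt
  set l := word.toList.zip pattern.toList with hl
  set pool := PySem.Chars.lower letters.toList with hp
  set avail := PySem.Dict.counter pool with ha
  show pvALoop l avail
      = if l.any (fun wp => !decide (wp.2 = '_' ∨ wp.2 = '?') && decide (wp.1 ≠ wp.2)) then false
        else (pvWild l).all (fun c => decide ((pvWild l).count c ≤ pool.count c))
  by_cases hm : pvNoMis l = true
  · have hany : l.any (fun wp => !decide (wp.2 = '_' ∨ wp.2 = '?') && decide (wp.1 ≠ wp.2)) = false := by
      simpa [pvNoMis] using hm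
    rw [hany, if_neg (by simp)]
    have hgetD : ∀ c, avail.getD c 0 = (pool.count c : Int) := fun c => by
      rw [ha, PySem.Dict.getD_counter]
    have hB : ((pvWild l).all (fun c => decide ((pvWild l).count c ≤ pool.count c)))
        = decide (∀ c ∈ pvWild l, ((pvWild l).count c : Int) ≤ avail.getD c 0) := by
      rw [Bool.eq_iff_iff]
      simp only [List.all_eq_true, decide_eq_true_eq, hgetD, Nat.cast_le]
    rw [hB]
    cases hA : pvALoop l avail
    · symm
      rw [decide_eq_false_iff_not]
      intro hall
      have : pvALoop l avail = true := (pvALoop_char l avail).mpr ⟨hm, hall⟩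
      rw [hA] at this; exact Bool.false_ne_true this
    · symm
      rw [decide_eq_true_eq]
      exact ((pvALoop_char l avail).mp hA).2
  · have hm' : pvNoMis l = false := by simpa using hm
    have hany : l.any (fun wp => !decide (wp.2 = '_' ∨ wp.2 = '?') && decide (wp.1 ≠ wp.2)) = true := by
      simpa [pvNoMis] using hm'
    rw [hany, if_pos rfl]
    cases hA : pvALoop l avail
    · rfl
    · exact absurd ((pvALoop_char l avail).mp hA).1 (by simp [hm'])
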